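-- pv_equiv track=rewrite | github.com/xyiqq/blueprint-studio | custom_components/blueprint_studio/backend/ai_validators.py | _find_parent_section
-- ===== SOURCE A (Python) =====
-- def _find_parent_section(lines: list[str], current_line_num: int) -> str:
--     """Find the top-level YAML section (indent 0) that contains the current line."""
--     for i in range(current_line_num - 2, -1, -1):
--         prev_line = lines[i]
--         stripped = prev_line.strip()
--         if not stripped or stripped.startswith('#'):
--             continue
--         indent = len(prev_line) - len(prev_line.lstrip())
--         if indent == 0 and stripped.endswith(':'):
--             return stripped[:-1]
--     return ""
-- ===== SOURCE B (Python) =====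
-- def _find_parent_section(lines: list[str], current_line_num: int) -> str:
--     """Find the top-level YAML section (indent 0) that contains the current line.
--
--     Forward single pass keeping the last top-level header seen before the line,
--     instead of scanning backward for the first one."""
--     parent = ""
--     for i, line in enumerate(lines):
--         if i > current_line_num - 2:
--             break
--         stripped = line.strip()
--         if stripped and not stripped.startswith('#') \
--                 and len(line) == len(line.lstrip()) and stripped.endswith(':'):
--             parent = stripped[:-1]
--     return parent
-- ===== Notes on version B (the rewrite author's own statement) =====
-- stated objective: alternative
-- what changed: B replaces A's backward first-match scan (range(current_line_num-2,-1,-1) returning on the first hit) with a forward pass over enumerate(lines) that keeps the last top-level header in an accumulator and breaks past the bound.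
import Mathlib
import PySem

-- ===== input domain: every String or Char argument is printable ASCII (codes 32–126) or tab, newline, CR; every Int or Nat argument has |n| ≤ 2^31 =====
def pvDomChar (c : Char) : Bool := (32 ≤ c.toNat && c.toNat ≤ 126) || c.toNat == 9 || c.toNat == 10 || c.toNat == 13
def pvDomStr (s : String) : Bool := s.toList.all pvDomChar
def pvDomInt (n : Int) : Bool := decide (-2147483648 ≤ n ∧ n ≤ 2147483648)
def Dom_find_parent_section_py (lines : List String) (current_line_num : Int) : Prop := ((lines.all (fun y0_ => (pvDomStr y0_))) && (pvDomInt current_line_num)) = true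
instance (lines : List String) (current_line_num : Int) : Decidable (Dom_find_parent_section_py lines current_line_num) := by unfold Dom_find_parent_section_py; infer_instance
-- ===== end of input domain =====

-- B scans forward keeping the last top-level header instead of A's backward first-match scan; same value wherever A returns.

-- ===== PORT A =====
-- backward loop over the index list range(current_line_num-2, -1, -1); IndexError (pyGet? = none) excluded by Pre_
def fpsA_loop (lines : List String) : List Int → String
  | [] => ""
  | i :: rest =>
    match PySem.List.pyGet? lines i with
    | none => ""   -- lines[i] raises IndexError here; such inputs are outside Pre_
    | some prev_line =>
      let stripped := PySem.Str.strip prev_line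
      if PySem.Str.len stripped == 0 || PySem.Str.startswith stripped "#" then
        fpsA_loop lines rest
      else if (PySem.Str.len prev_line - PySem.Str.len (PySem.Str.lstrip prev_line) == 0)
              && PySem.Str.endswith stripped ":" then
        PySem.Str.slice stripped none (some (-1))
      else fpsA_loop lines rest

def find_parent_section_py (lines : List String) (current_line_num : Int) : String :=
  fpsA_loop lines (PySem.List.pyRange (current_line_num - 2) (-1) (-1))

-- ===== PORT B =====
-- forward loop over enumerate(lines) with an accumulator `parent`, breaking once i > current_line_num - 2
def fpsB_loop (c : Int) : List (Int × String) → String → String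
  | [], parent => parent
  | (i, line) :: rest, parent =>
    if i > c - 2 then parent
    else
      let stripped := PySem.Str.strip line
      if PySem.Str.len stripped != 0 && !PySem.Str.startswith stripped "#"
          && (PySem.Str.len line == PySem.Str.len (PySem.Str.lstrip line))
          && PySem.Str.endswith stripped ":" then
        fpsB_loop c rest (PySem.Str.slice stripped none (some (-1)))
      else
        fpsB_loop c rest parent

def find_parent_section_py_alt (lines : List String) (current_line_num : Int) : String :=
  fpsB_loop current_line_num (PySem.List.enumerate lines 0) ""

-- ===== PRECONDITION & SPEC =====
-- A indexes lines[current_line_num - 2] when that is ≥ 0, so it raises IndexError iff current_line_num ≥ len(lines) + 2.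
def Pre_find_parent_section_py (lines : List String) (current_line_num : Int) : Prop :=
  current_line_num ≤ (lines.length : Int) + 1
instance (lines : List String) (current_line_num : Int) : Decidable (Pre_find_parent_section_py lines current_line_num) := by unfold Pre_find_parent_section_py; infer_instance

def pvWitness_find_parent_section_py : List String × Int := (["top:", "  sub: 1"], 2)

def Spec_find_parent_section_py (lines : List String) (current_line_num : Int) (out : String) : Prop := out = find_parent_section_py_alt lines current_line_num
instance (lines : List String) (current_line_num : Int) (out : String) : Decidable (Spec_find_parent_section_py lines current_line_num out) := by unfold Spec_find_parent_section_py; infer_instance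

-- ===== CLAIM (what is proved, stated in full; the proofs are below) =====
def Claim_equal_find_parent_section_py : Prop := ∀ (lines : List String) (current_line_num : Int), Dom_find_parent_section_py lines current_line_num → Pre_find_parent_section_py lines current_line_num → Spec_find_parent_section_py lines current_line_num (find_parent_section_py lines current_line_num)

-- ===== LEMMAS AND PROOFS =====

-- the common body of both loops: overwrite `parent` iff the line is a top-level header
def fpsStep (parent line : String) : String :=
  if PySem.Str.len (PySem.Str.strip line) != 0 && !PySem.Str.startswith (PySem.Str.strip line) "#"
      && (PySem.Str.len line == PySem.Str.len (PySem.Str.lstrip line))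
      && PySem.Str.endswith (PySem.Str.strip line) ":" then
    PySem.Str.slice (PySem.Str.strip line) none (some (-1))
  else parent

-- the generic if-shape fact relating A's skip/return body to the single overwrite step
lemma bool_core (b1 b2 b3 b4 b5 : Bool) (h35 : b3 = b5) (a acc : String) :
    (if b1 || b2 then acc else if b3 && b4 then a else acc)
      = (if !b1 && !b2 && b5 && b4 then a else acc) := by
  subst h35; cases b1 <;> cases b2 <;> cases b3 <;> cases b4 <;> simp

-- A's loop body equals fpsStep applied to the would-be accumulator
lemma fpsA_body_eq (x acc : String) :
    (if PySem.Str.len (PySem.Str.strip x) == 0 || PySem.Str.startswith (PySem.Str.strip x) "#" then acc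
     else if (PySem.Str.len x - PySem.Str.len (PySem.Str.lstrip x) == 0)
             && PySem.Str.endswith (PySem.Str.strip x) ":" then
       PySem.Str.slice (PySem.Str.strip x) none (some (-1))
     else acc) = fpsStep acc x := by
  have hle : PySem.Str.len (PySem.Str.lstrip x) ≤ PySem.Str.len x := by
    simp only [PySem.Str.len_eq, PySem.Str.toList_lstrip, PySem.Chars.lstrip]
    exact_mod_cast (List.dropWhile_sublist _).length_le
  have h35 : (PySem.Str.len x - PySem.Str.len (PySem.Str.lstrip x) == 0)
      = (PySem.Str.len x == PySem.Str.len (PySem.Str.lstrip x)) := by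
    rw [Bool.eq_iff_iff]; simp only [beq_iff_eq]; omega
  exact bool_core _ _ _ _ _ h35 _ _

lemma fpsB_loop_eq (c : Int) (xs : List String) :
    ∀ (k : Int) (parent : String),
      fpsB_loop c (PySem.List.enumerate xs k) parent
        = (xs.take (c - 1 - k).toNat).foldl fpsStep parent := by
  induction xs with
  | nil => intro k parent; simp [PySem.List.enumerate_nil, fpsB_loop]
  | cons x t ih =>
    intro k parent
    rw [PySem.List.enumerate_cons]
    by_cases hk : k > c - 2
    · have h0 : (c - 1 - k).toNat = 0 := by omega
      simp [fpsB_loop, hk, h0]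
    · have h1 : (c - 1 - k).toNat = (c - 1 - (k + 1)).toNat + 1 := by omega
      rw [fpsB_loop, if_neg hk, h1, List.take_succ_cons, List.foldl_cons]
      cases hP : (PySem.Str.len (PySem.Str.strip x) != 0 && !PySem.Str.startswith (PySem.Str.strip x) "#"
          && (PySem.Str.len x == PySem.Str.len (PySem.Str.lstrip x))
          && PySem.Str.endswith (PySem.Str.strip x) ":")
      · have hstep : fpsStep parent x = parent := by
          simp only [fpsStep, hP, Bool.false_eq_true, if_false]
        simp only [hP, Bool.false_eq_true, if_false, ih, hstep]
      · have hstep : fpsStep parent x = PySem.Str.slice (PySem.Str.strip x) none (some (-1)) := by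
          simp only [fpsStep, hP, if_true]
        simp only [hP, if_true, ih, hstep]

lemma fpsA_loop_eq (lines : List String) :
    ∀ (n : Nat), n ≤ lines.length →
      fpsA_loop lines (PySem.List.pyRange ((n : Int) - 1) (-1) (-1))
        = (lines.take n).foldl fpsStep "" := by
  intro n
  induction n with
  | zero =>
    intro _
    rw [PySem.List.pyRange_neg_one_eq_nil (by omega)]
    simp [fpsA_loop]
  | succ m ih =>
    intro hlen
    have hm : m < lines.length := by omega
    have hcast : ((m + 1 : Nat) : Int) - 1 = (m : Int) := by push_cast; ring
    rw [hcast, PySem.List.pyRange_neg_one_cons (by omega)]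
    rw [fpsA_loop, PySem.List.pyGet?_ofNat lines m hm]
    have htake : lines.take (m + 1) = lines.take m ++ [lines[m]] := by
      rw [List.take_add_one, List.getElem?_eq_getElem hm]; rfl
    rw [htake, List.foldl_concat, ih (by omega)]
    exact fpsA_body_eq lines[m] ((lines.take m).foldl fpsStep "")

-- ===== VERDICT (by name: the statement is the Claim_ definition above) =====
theorem find_parent_section_py_spec : Claim_equal_find_parent_section_py := by
  intro lines c _ hpre
  unfold Spec_find_parent_section_py find_parent_section_py find_parent_section_py_alt Pre_find_parent_section_py at *
  rw [fpsB_loop_eq]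
  by_cases hc : c ≤ 1
  · have h0 : (c - 1 - 0).toNat = 0 := by omega
    rw [PySem.List.pyRange_neg_one_eq_nil (by omega), h0]
    simp [fpsA_loop]
  · have hle : (c - 1).toNat ≤ lines.length := by omega
    have he : c - 2 = (((c - 1).toNat : Nat) : Int) - 1 := by omega
    rw [he, fpsA_loop_eq lines (c - 1).toNat hle]
    have h2 : (c - 1 - 0).toNat = (c - 1).toNat := by omega
    rw [h2]
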